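-- pv_equiv track=rewrite | github.com/MatthewYung0/Hyperskill | Python/3_Hard/EasyBusRiderCompany/4_6-SpecialStops/easyrider.py | get_transfer_stops
-- ===== SOURCE A (Python) =====
-- def get_transfer_stops(data_):
--     streets = {}
--     transfer_stops = []
--
--     for item in data_:
--         value = item.get("stop_name")
--         if value:
--             if value in streets:
--                 streets[value] += 1
--             else:
--                 streets[value] = 1
--
--     for key, value in streets.items():
--         if value > 1:
--             transfer_stops.append(key)
--     return sorted(list(dict.fromkeys(transfer_stops)))
-- ===== SOURCE B (Python) =====
-- def get_transfer_stops(data_):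
--     seen = set()
--     transfers = set()
--     for item in data_:
--         value = item.get("stop_name")
--         if value:
--             if value in seen:
--                 transfers.add(value)
--             else:
--                 seen.add(value)
--     return sorted(transfers)
-- ===== Notes on version B (the rewrite author's own statement) =====
-- stated objective: simpler
-- what changed: Replaces the occurrence-count dict plus a separate >1 filter loop and a dedup pass with single-pass duplicate detection using two sets (seen/transfers), returning sorted(transfers).
import Mathlib
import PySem

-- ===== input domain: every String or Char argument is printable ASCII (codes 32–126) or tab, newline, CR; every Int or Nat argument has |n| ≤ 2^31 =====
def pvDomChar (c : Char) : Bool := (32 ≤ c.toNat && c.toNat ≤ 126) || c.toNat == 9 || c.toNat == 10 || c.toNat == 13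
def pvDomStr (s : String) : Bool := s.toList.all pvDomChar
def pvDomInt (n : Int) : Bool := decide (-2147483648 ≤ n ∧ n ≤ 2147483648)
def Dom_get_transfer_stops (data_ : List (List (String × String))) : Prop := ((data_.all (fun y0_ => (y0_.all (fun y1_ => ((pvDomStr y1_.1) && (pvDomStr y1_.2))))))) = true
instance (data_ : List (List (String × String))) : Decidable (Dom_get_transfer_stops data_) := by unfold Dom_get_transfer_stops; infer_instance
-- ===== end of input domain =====

-- B replaces A's count-dict + >1-filter + dedup with single-pass duplicate detection
-- using two sets; the proofs show both return the sorted list of repeated stop names.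

-- ===== PORT A =====
def get_transfer_stops (data_ : List (List (String × String))) : List String :=
  let streets : PySem.Dict String Int :=
    data_.foldl (fun streets item =>
      match List.lookup "stop_name" item with
      | some value =>
          if value ≠ "" then
            if streets.contains value then
              streets.insert value (streets.getD value 0 + 1)
            else
              streets.insert value 1
          else streets
      | none => streets) PySem.Dict.empty
  let transfer_stops : List String :=
    streets.items.foldl (fun acc kv => if kv.2 > 1 then acc ++ [kv.1] else acc) []
  PySem.List.sorted (PySem.List.dedup transfer_stops) (fun x => x) false

-- ===== PORT B =====
def get_transfer_stops_alt (data_ : List (List (String × String))) : List String :=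
  let st : PySem.Set String × PySem.Set String :=
    data_.foldl (fun st item =>
      match List.lookup "stop_name" item with
      | some value =>
          if value ≠ "" then
            if PySem.Set.contains st.1 value then
              (st.1, PySem.Set.add st.2 value)
            else
              (PySem.Set.add st.1 value, st.2)
          else st
      | none => st) (PySem.Set.empty, PySem.Set.empty)
  PySem.List.sorted st.2 (fun x => x) false

-- ===== PRECONDITION & SPEC =====
def Spec_get_transfer_stops (data_ : List (List (String × String))) (out : List String) : Prop := out = get_transfer_stops_alt data_
instance (data_ : List (List (String × String))) (out : List String) : Decidable (Spec_get_transfer_stops data_ out) := by unfold Spec_get_transfer_stops; infer_instance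

-- ===== CLAIM (what is proved, stated in full; the proofs are below) =====
def Claim_equal_get_transfer_stops : Prop := ∀ (data_ : List (List (String × String))), Dom_get_transfer_stops data_ → Spec_get_transfer_stops data_ (get_transfer_stops data_)

-- ===== LEMMAS AND PROOFS =====

-- the list of truthy stop_name values of data_, in order
def pvVals (data_ : List (List (String × String))) : List String :=
  data_.flatMap (fun item =>
    match List.lookup "stop_name" item with
    | some value => if value ≠ "" then [value] else []
    | none => [])

-- B's loop body, over a single extracted value
def pvStep (st : PySem.Set String × PySem.Set String) (v : String) :
    PySem.Set String × PySem.Set String :=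
  if PySem.Set.contains st.1 v then (st.1, PySem.Set.add st.2 v)
  else (PySem.Set.add st.1 v, st.2)

theorem foldl_flatMap {α β γ : Type} (g : γ → β → γ) (f : α → List β)
    (l : List α) (init : γ) :
    (l.flatMap f).foldl g init = l.foldl (fun acc x => (f x).foldl g acc) init := by
  induction l generalizing init with
  | nil => rfl
  | cons a t ih => simp [List.flatMap_cons, List.foldl_append, ih]

theorem foldl_congr' {α β : Type} {f g : β → α → β} (l : List α) (init : β)
    (h : ∀ b a, a ∈ l → f b a = g b a) : l.foldl f init = l.foldl g init := by
  induction l generalizing init with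
  | nil => rfl
  | cons a t ih =>
      simp only [List.foldl_cons]
      rw [h init a (List.mem_cons_self), ih]
      intro b x hx
      exact h b x (List.mem_cons_of_mem a hx)

theorem set_ofList_append_singleton (l : List String) (a : String) :
    PySem.Set.ofList (l ++ [a]) = PySem.Set.add (PySem.Set.ofList l) a := by
  rw [PySem.Set.ofList_eq_foldl, PySem.Set.ofList_eq_foldl, List.foldl_append]
  rfl

theorem set_nodup_add (s : PySem.Set String) (a : String) (h : s.Nodup) :
    (PySem.Set.add s a).Nodup := by
  unfold PySem.Set.add
  split
  · exact h
  · rename_i hc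
    simp only [List.nodup_append, List.nodup_singleton, true_and]
    refine ⟨h, fun x hx y hy hxy => ?_⟩
    rw [List.mem_singleton] at hy
    subst hy
    subst hxy
    exact hc ((PySem.Set.contains_iff s x).2 hx)

-- A's dict loop counts exactly the values pvVals
theorem streets_eq_counter (data_ : List (List (String × String))) :
    data_.foldl (fun streets item =>
      match List.lookup "stop_name" item with
      | some value =>
          if value ≠ "" then
            if streets.contains value then
              streets.insert value (streets.getD value 0 + 1)
            else
              streets.insert value 1
          else streets
      | none => streets) (PySem.Dict.empty : PySem.Dict String Int)
    = PySem.Dict.counter (pvVals data_) := by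
  rw [← PySem.Dict.foldl_insert_getD_add_one_eq_counter, pvVals, foldl_flatMap]
  apply foldl_congr'
  intro d item _
  cases h : List.lookup "stop_name" item with
  | none => simp
  | some value =>
      by_cases hv : value = "" <;> simp only [hv, ne_eq, not_true_eq_false, if_false,
        not_false_eq_true, if_true, List.foldl_cons, List.foldl_nil]
      by_cases hc : d.contains value
      · simp [hc]
      · have h0 : d.getD value 0 = 0 :=
          PySem.Dict.getD_of_not_contains d 0 (by simpa using hc)
        simp [hc, h0]

-- A's filter loop output: repeated values, each once, in first-seen order
theorem transferA_eq (vals : List String) :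
    (PySem.Dict.counter vals).items.foldl
        (fun acc kv => if kv.2 > 1 then acc ++ [kv.1] else acc) []
    = (PySem.Set.ofList vals).filter (fun k => decide ((vals.count k : Int) > 1)) := by
  have h := PySem.List.foldl_append_if
      (fun kv : String × Int => decide (kv.2 > 1)) (fun kv => kv.1)
      (PySem.Dict.counter vals).items []
  simp only [decide_eq_true_eq] at h
  rw [h, PySem.Dict.items_counter, List.filter_map, List.map_map]
  simp [Function.comp_def]

-- invariant of B's one-pass loop over the extracted values
theorem b_loop_inv (vals : List String) :
    (vals.foldl pvStep (PySem.Set.empty, PySem.Set.empty)).1 = PySem.Set.ofList vals ∧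
    (vals.foldl pvStep (PySem.Set.empty, PySem.Set.empty)).2.Nodup ∧
    ∀ x, (x ∈ (vals.foldl pvStep (PySem.Set.empty, PySem.Set.empty)).2 ↔ 2 ≤ vals.count x) := by
  induction vals using List.reverseRecOn with
  | nil =>
      refine ⟨rfl, List.nodup_nil, ?_⟩
      intro x
      simp [PySem.Set.empty]
  | append_singleton l a ih =>
      obtain ⟨h1, h2, h3⟩ := ih
      rw [List.foldl_append, List.foldl_cons, List.foldl_nil, set_ofList_append_singleton]
      set st := l.foldl pvStep (PySem.Set.empty, PySem.Set.empty) with hst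
      unfold pvStep
      by_cases hc : PySem.Set.contains st.1 a
      · have ha : a ∈ l := by
          rw [← PySem.Set.mem_ofList, ← h1]
          exact (PySem.Set.contains_iff _ _).1 hc
        have hcon : PySem.Set.contains (PySem.Set.ofList l) a = true := by
          rw [h1] at hc; exact hc
        refine ⟨?_, ?_, ?_⟩
        · simp only [hc, if_true]
          rw [h1]
          simp [PySem.Set.add, PySem.Set.mem_ofList, ha]
        · simp only [hc, if_true]
          exact set_nodup_add _ _ h2
        · intro x
          simp only [hc, if_true]
          rw [PySem.Set.mem_add, h3 x, List.count_append, List.count_singleton]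
          by_cases hx : x = a
          · subst hx
            have h1c : 1 ≤ l.count x := List.one_le_count_iff.2 ha
            have hcnt : l.count x + (if (x == x) = true then 1 else 0) = l.count x + 1 := by
              simp
            rw [hcnt]
            exact ⟨fun _ => by omega, fun _ => Or.inr rfl⟩
          · have hcnt : l.count x + (if (a == x) = true then 1 else 0) = l.count x := by
              simp [Ne.symm hx]
            rw [hcnt]
            simp [hx]
      · have ha : a ∉ l := by
          intro hmem
          apply hc
          rw [h1, PySem.Set.contains_iff, PySem.Set.mem_ofList]
          exact hmem
        refine ⟨?_, ?_, ?_⟩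
        · simp only [hc, Bool.false_eq_true, if_false]
          rw [h1]
        · simpa only [hc, Bool.false_eq_true, if_false] using h2
        · intro x
          simp only [hc, Bool.false_eq_true, if_false]
          rw [h3 x, List.count_append, List.count_singleton]
          by_cases hx : x = a
          · subst hx
            have h0 : l.count x = 0 := List.count_eq_zero.2 ha
            simp [h0]
          · have hcnt : l.count x + (if (a == x) = true then 1 else 0) = l.count x := by
              simp [Ne.symm hx]
            rw [hcnt]

theorem get_transfer_stops_eq (data_ : List (List (String × String))) :
    get_transfer_stops data_ = get_transfer_stops_alt data_ := by
  simp only [get_transfer_stops, get_transfer_stops_alt]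
  rw [streets_eq_counter, transferA_eq, PySem.List.dedup_eq_ofList]
  have hloop : data_.foldl (fun st item =>
      match List.lookup "stop_name" item with
      | some value =>
          if value ≠ "" then
            if PySem.Set.contains st.1 value then (st.1, PySem.Set.add st.2 value)
            else (PySem.Set.add st.1 value, st.2)
          else st
      | none => st) ((PySem.Set.empty : PySem.Set String), (PySem.Set.empty : PySem.Set String))
      = (pvVals data_).foldl pvStep (PySem.Set.empty, PySem.Set.empty) := by
    rw [pvVals, foldl_flatMap]
    apply foldl_congr'
    intro st item _
    cases h : List.lookup "stop_name" item with
    | none => rfl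
    | some value =>
        by_cases hv : value = "" <;>
          simp [hv, pvStep]
  rw [hloop]
  obtain ⟨h1, h2, h3⟩ := b_loop_inv (pvVals data_)
  have hfnd : ((PySem.Set.ofList (pvVals data_)).filter
      (fun k => decide ((((pvVals data_).count k : Int)) > 1))).Nodup :=
    (PySem.Set.nodup_ofList _).filter _
  rw [PySem.Set.ofList_eq_self_of_nodup _ hfnd,
    PySem.List.sorted_id_eq_sorted_id_iff_perm,
    List.perm_ext_iff_of_nodup hfnd h2]
  intro x
  rw [h3 x, List.mem_filter, PySem.Set.mem_ofList]
  constructor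
  · rintro ⟨-, h⟩
    simp only [decide_eq_true_eq] at h
    omega
  · intro h
    refine ⟨List.one_le_count_iff.1 (by omega), ?_⟩
    simp only [decide_eq_true_eq]
    omega

-- ===== VERDICT (by name: the statement is the Claim_ definition above) =====
theorem get_transfer_stops_spec : Claim_equal_get_transfer_stops := by
  intro data_ _
  unfold Spec_get_transfer_stops
  exact get_transfer_stops_eq data_
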